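/- GENERATED by tools/from_farm_form.py from prooffarm-gif/accepted/DGifDecompressInput.E/Proof.lean (a worked proof of the farm's unit `DGifDecompressInput.E`,
   accepted by the verdict) — do not edit. -/
import Gif.Spec.Units.DGifDecompressInput_E
import Gif.Spec.AllSegs

/-!
  `DGifDecompressInput.E` (0x106874 … the `ret` at 0x10688d, 9 instructions; dgif_lib.c:1110): THE EPILOGUE OF A PROTECTED FUNCTION.
  The recipe is that of farm.gif/worked/DGifGetWord.E (Gif/Spec/FrameCarry.lean §1, §2, §4):
    1. the prelude: the segment's entry assertion `Done` as walker facts; the shadow index register `r14` as a word VARIABLE `b`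
       with bounds (no `>>> 3` in the walk's context);
    2. the walk to the `ret` (the six pops and the return address are read through the shadow store by the walker itself);
    3. `stores1_index`: `hmem : s.mem = storesMem v.mem (base / 8) F.epilogue`;
    4. `after_epilogue` (`HeapInv` for the callers' frames, `GifOK`, `rem`), `epilogue_same` (`Returned.same`); the post's reads
       (`LZOK`, `mu`, `*Code`) lie below the shadow region: `storesMem_sameExcept`, `rd_storesMem`;
    5. `Returned`, field by field.
-/

open X86 X86.User Asan ProgX.Base ProgX.Base.Spec Gif.Spec

namespace Gif.Spec.DGifDecompressInput_E

/-- The epilogue's only shadow store, as the layout says it (the literal list the index lemmas speak of). -/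
theorem dinE_epilogue : Gif.Frames.DGifDecompressInput.epilogue = [⟨0, 8, 0⟩] := rfl

/-- The epilogue's store stays inside the frame's 8 shadow bytes (64 / 8). -/
theorem dinE_epilogue_in : ∀ s, s ∈ Gif.Frames.DGifDecompressInput.epilogue → s.idx + s.width ≤ 8 := by
  decide

end Gif.Spec.DGifDecompressInput_E

/-- The epilogue of `DGifDecompressInput` takes `Done` at 0x106874 to `Returned`. -/
theorem Gif.Spec.Proved.DGifDecompressInput_E_ok : Gif.Spec.DGifDecompressInput_E.Statement := by
  unfold Gif.Spec.DGifDecompressInput_E.Statement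
  intro Lay hLay μ hμ u₀ hcode H rest frames F R e ret v hat
  -- 1. THE PRELUDE: the entry assertion `Done` = `Body` + the results
  obtain ⟨hbody, hres, hlz, hok1⟩ := hat
  have he := hbody.entry
  v_entry he
  obtain ⟨henv, hlz0, hrdi, hcode4⟩ := hbody.pre
  -- what the walker reads of a segment's entry state: rip, rsp (as `c_rsp`), the registers kept, the text, DF / MXCSR
  have w_rip := hbody.rip
  have c_rsp : v.reg .rsp = e.reg .rsp - 120 := hbody.rsp
  have w_kept : RegsKept [.rsp] v v := RegsKept.refl _ _
  have w_eq : Mem.EqOn ProgX.Base.L.textLo ProgX.Base.L.textHi u₀.mem v.mem := ProgX.Base.conv_code_eqOn hbody.code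
  have hdf := (show abiInv _ from hbody.abi).1
  have hmx := (show abiInv _ from hbody.abi).2
  have hsse := ProgX.Base.sseOK_of_abiInv hbody.abi
  -- the slots the six pops (0x106883 … 0x10688b) and the `ret` (0x10688d) read
  have k_r15 : v.mem.readLE (e.reg .rsp - 8) 8 = (e.reg .r15).toNat := hbody.slot_r15
  have k_r14 : v.mem.readLE (e.reg .rsp - 16) 8 = (e.reg .r14).toNat := hbody.slot_r14
  have k_r13 : v.mem.readLE (e.reg .rsp - 24) 8 = (e.reg .r13).toNat := hbody.slot_r13
  have k_r12 : v.mem.readLE (e.reg .rsp - 32) 8 = (e.reg .r12).toNat := hbody.slot_r12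
  have k_rbp : v.mem.readLE (e.reg .rsp - 40) 8 = (e.reg .rbp).toNat := hbody.slot_rbp
  have k_rbx : v.mem.readLE (e.reg .rsp - 48) 8 = (e.reg .rbx).toNat := hbody.slot_rbx
  have k_ra : UInt64.ofNat (v.mem.readLE (e.reg .rsp) 8) = ret := hbody.slot_ra
  -- THE SHADOW INDEX REGISTER `r14` AS A VARIABLE `b` WITH BOUNDS: no `>>> 3` is in the walk's context
  have e120 : (e.reg .rsp - 120).toNat = (e.reg .rsp).toNat - 120 := by
    u_omega
  obtain ⟨b, hb⟩ : ∃ b : Word, b = (e.reg .rsp - 120) >>> 3 := ⟨_, rfl⟩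
  have hbn : b.toNat = ((e.reg .rsp).toNat - 120) / 8 := by
    rw [hb, Asan.toNat_shr3, e120]
  have hb1 : 0xE0000 ≤ b.toNat := by
    omega
  have hb2 : b.toNat + 8 ≤ 0x100000 := by
    omega
  have c_r14 : v.reg .r14 = b := by
    rw [hb]
    exact hbody.r14
  clear hb
  -- 2. THE WALK, from 0x106874 (`mov QWORD PTR [r14+0xc00000], 0`) to the `ret` at 0x10688d: no side goal is left
  u_walk hcode [hμ.vendor] span [ProgX.Base.L.textLo, ProgX.Base.L.textHi] side (v_side)
  -- 3. THE EPILOGUE'S STORE AS THE LAYOUT'S `storesMem`: the displacement as the walker prints it, granule offset, width, value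
  have hmem : s_10688d.mem = storesMem v.mem (((e.reg .rsp).toNat - 120) / 8) Gif.Frames.DGifDecompressInput.epilogue := by
    rw [Gif.Spec.DGifDecompressInput_E.dinE_epilogue, w_mem, ← hbn]
    exact stores1_index v.mem b 12582912 0 8 0 (by omega) (by decide) (by decide)
  have hin := Gif.Spec.DGifDecompressInput_E.dinE_epilogue_in
  clear w_mem
  -- 4. THE ENVIRONMENT behind the epilogue: the callers' frames, the clean stack ends above the return address
  obtain ⟨hinv2, hok2, hrem2⟩ := after_epilogue (top := (e.reg .rsp).toNat) (ro := 120) (Fl := Gif.Frames.DGifDecompressInput) rfl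
    hbody.inv henv.ctx hbody.ok he_align he_top henv.heap.inv.frames_above
  -- the frame's shadow span leaves the footprint
  have hsame2 := epilogue_same (top := (e.reg .rsp).toNat) (ro := 120) (ro' := 56) (Fl := Gif.Frames.DGifDecompressInput) rfl rfl
    henv.heap.inv hbody.inv he_align hbody.same
  -- the store's own footprint: 8 shadow bytes; everything the post reads lies below 0xC00000
  have hsh : Mem.SameExcept [⟨0xC00000 + ((e.reg .rsp).toNat - 120) / 8, 0xC00000 + ((e.reg .rsp).toNat - 120) / 8 + 8⟩] v.mem
      (storesMem v.mem (((e.reg .rsp).toNat - 120) / 8) Gif.Frames.DGifDecompressInput.epilogue) :=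
    storesMem_sameExcept v.mem _ 8 _ hin (by omega)
  rw [← hmem] at hinv2 hok2 hrem2 hsame2 hsh
  -- where pv, the cursor and `Code` are (numbers)
  have hpin := henv.ok.owns.inside henv.heap.inv.heap (o := (F.pv, 24936)) (List.mem_cons_of_mem _ List.mem_cons_self)
  have hp_hi : F.pv + 24936 + 32 ≤ 0xC00000 := hpin.2.2.2.2
  have hcur := henv.ctx.cursor_range henv.heap.inv.shadow
  have hcur_hi : R.cur + 16 ≤ 0x800000 := hcur.2.1
  have hcode_hi : (e.reg .rsi).toNat + 4 ≤ 0x800000 := hcode4.low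
  clear hpin hcur
  -- the LZW field ranges, the measure and `*Code` through the shadow store
  have hlz2 : LZOK s_10688d.mem F.pv := by
    refine hlz.sameExcept hsh (by omega) ?_
    intro w hw
    have ew := List.mem_singleton.mp hw
    rw [ew]
    simp only
    omega
  have hmu2 : mu R s_10688d.mem F.pv = mu R v.mem F.pv := by
    refine mu_sameExcept hsh (by omega) (by omega) ?_ ?_ ?_
    · intro w hw
      have ew := List.mem_singleton.mp hw
      rw [ew]
      simp only
      omega
    · intro w hw
      have ew := List.mem_singleton.mp hw
      rw [ew]
      simp only
      omega
    · intro w hw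
      have ew := List.mem_singleton.mp hw
      rw [ew]
      simp only
      omega
  have hrd : rd s_10688d.mem (e.reg .rsi).toNat 4 = rd v.mem (e.reg .rsi).toNat 4 := by
    rw [hmem]
    exact rd_storesMem v.mem _ 8 _ hin (by omega) _ _ (by omega)
  have e_rax : s_10688d.reg .rax = v.reg .rax := w_kept.get .rax rfl
  -- 5. `Returned`, field by field
  refine ReachVia.done ?_
  refine X86.User.Returned.mk w_rip w_rsp ?saved ?same (ProgX.Base.conv_code_in w_eq) ?abi ?post
  case saved =>
    -- all six callee-saved registers were pushed: the popped values are the walker's facts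
    intro r hr
    cases r <;> first
      | exact absurd hr (by decide)
      | (with_reducible assumption)
  case same =>
    simp only [X86.User.Spec.footprint, vspec]
    exact hsame2
  case abi =>
    -- DF and MXCSR by hand (`v_inv` is slow behind a walk with shadow stores)
    refine ProgX.Base.abiInv_of ?_ ?_
    · rw [w_flags]
      simp only [X86.User.df_setStatus]
      exact hdf
    · rw [w_mxcsr]
      exact hmx
  case post =>
    -- `Back` (the environment, the reader did not go back), `LZOK`, the result, the clause of GIF_OK
    refine ⟨⟨hinv2, hok2, ?_⟩, hlz2, ?_, ?_⟩
    · rw [hrem2]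
      exact hbody.rem
    · unfold IsBool
      rw [e_rax]
      exact hres
    · rw [e_rax, hrd, hmu2]
      exact hok1
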